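-- pv_equiv track=rewrite | github.com/chausler/tropical_forest | arxiv/topic_chain.py | get_edges_between_two_time_slices
-- ===== SOURCE A (Python) =====
-- def get_edges_between_two_time_slices(distance_table, threshold, max_outgoing, max_incoming):
--     """
--     :param distance_table:
--     :param threshold:
--     :param max_outgoing:
--     :param max_incoming:
--     :return:
--     """
--     lst = []
--     l = len(distance_table)
--     # find outgoing connections under the limit
--     for i in range(l):
--         outgoings = list(filter(lambda x: distance_table[i][x] < threshold, range(l)))
--         if len(outgoings) > max_outgoing:
--             outgoings = sorted(outgoings, key=lambda x: distance_table[i][x])[:max_outgoing]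
--         lst.append(outgoings)
--     # restrict the number of incoming connections from the 'merge'
--     for j in range(l):
--         incoming_conns = [i for i, p in enumerate(lst) if j in p]
--         if len(incoming_conns) > max_incoming:
--             conns_removed = sorted(incoming_conns, key=lambda x: distance_table[x][j])[max_incoming:]
--             for i in conns_removed:
--                 lst[i].remove(j)
--     return lst
-- ===== SOURCE B (Python) =====
-- def get_edges_between_two_time_slices(distance_table, threshold, max_outgoing, max_incoming):
--     l = len(distance_table)
--     out = []
--     incoming = [[] for _ in range(l)]
--     # one pass: build outgoing lists and, at the same time, the reverse target->sources index
--     for i in range(l):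
--         row = distance_table[i]
--         og = [x for x in range(l) if row[x] < threshold]
--         if len(og) > max_outgoing:
--             og = sorted(og, key=lambda x: row[x])[:max_outgoing]
--         out.append(og)
--         for x in og:
--             incoming[x].append(i)
--     # decide which (source, target) edges exceed the incoming cap
--     removed = set()
--     for j in range(l):
--         srcs = incoming[j]
--         if len(srcs) > max_incoming:
--             for i in sorted(srcs, key=lambda x: distance_table[x][j])[max_incoming:]:
--                 removed.add((i, j))
--     return [[j for j in og if (i, j) not in removed] for i, og in enumerate(out)]
-- ===== Notes on version B (the rewrite author's own statement) =====
-- stated objective: faster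
-- what changed: B builds the reverse target->sources index while constructing the outgoing lists (one pass), computes the set of capped-off (source,target) edges from that index, and rebuilds the result by filtering, instead of A's per-target rescan of all outgoing lists (enumerate + membership test) followed by in-place list.remove calls.
import Mathlib
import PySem

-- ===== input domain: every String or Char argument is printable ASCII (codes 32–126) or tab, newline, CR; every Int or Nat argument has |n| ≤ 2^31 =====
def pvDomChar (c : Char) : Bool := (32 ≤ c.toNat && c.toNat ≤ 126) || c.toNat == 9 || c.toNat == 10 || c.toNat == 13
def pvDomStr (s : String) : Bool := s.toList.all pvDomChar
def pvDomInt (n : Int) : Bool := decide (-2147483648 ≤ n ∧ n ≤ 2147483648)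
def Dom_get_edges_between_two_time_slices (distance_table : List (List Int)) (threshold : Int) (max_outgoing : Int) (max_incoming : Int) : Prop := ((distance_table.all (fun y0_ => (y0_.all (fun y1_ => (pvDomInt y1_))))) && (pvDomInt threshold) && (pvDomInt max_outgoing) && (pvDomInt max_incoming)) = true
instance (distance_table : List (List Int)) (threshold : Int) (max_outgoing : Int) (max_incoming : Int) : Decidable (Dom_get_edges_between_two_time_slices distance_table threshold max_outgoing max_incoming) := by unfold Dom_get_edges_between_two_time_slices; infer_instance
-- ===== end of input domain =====

-- B builds a reverse target→sources index in the same pass that builds the outgoing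
-- lists and filters once against a set of capped-off edges, instead of A's per-target
-- rescan of all lists plus in-place removes (objective: faster).
-- A mutates nothing observable to the caller (it rebuilds `lst` internally).

-- distance_table[i][j] (exact for in-range indices, which Pre_ guarantees)
def pvDget (dt : List (List Int)) (i j : Int) : Int :=
  PySem.List.pyGetD (PySem.List.pyGetD dt i []) j 0

-- ===== PORT A =====
-- body of A's first loop: the (possibly capped) outgoing list of row i
def pvOutgoingsA (dt : List (List Int)) (threshold max_outgoing l i : Int) : List Int :=
  let outgoings := (PySem.List.pyRange 0 l 1).filter (fun x => decide (pvDget dt i x < threshold))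
  if PySem.List.len outgoings > max_outgoing then
    PySem.List.slice (PySem.List.sorted outgoings (fun x => pvDget dt i x) false) none (some max_outgoing)
  else outgoings

-- [i for i, p in enumerate(lst) if j in p]
def pvIncomingA (lst : List (List Int)) (j : Int) : List Int :=
  ((PySem.List.enumerate lst 0).filter (fun p => decide (j ∈ p.2))).map (fun p => p.1)

-- body of A's second loop: cap the incoming connections of target j
def pvRemoveStepA (dt : List (List Int)) (max_incoming : Int) (lst : List (List Int)) (j : Int) : List (List Int) :=
  let incoming_conns := pvIncomingA lst j
  if PySem.List.len incoming_conns > max_incoming then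
    let conns_removed := PySem.List.slice (PySem.List.sorted incoming_conns (fun x => pvDget dt x j) false) (some max_incoming) none
    conns_removed.foldl (fun lst i =>
      PySem.List.pySetD lst i ((PySem.List.remove? (PySem.List.pyGetD lst i []) j).getD (PySem.List.pyGetD lst i []))) lst
  else lst

def get_edges_between_two_time_slices (distance_table : List (List Int)) (threshold : Int) (max_outgoing : Int) (max_incoming : Int) : List (List Int) :=
  let l := PySem.List.len distance_table
  let lst := (PySem.List.pyRange 0 l 1).foldl
    (fun lst i => lst ++ [pvOutgoingsA distance_table threshold max_outgoing l i]) []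
  (PySem.List.pyRange 0 l 1).foldl (pvRemoveStepA distance_table max_incoming) lst

-- ===== PORT B =====
-- Source B's og for row i (row is looked up once)
def pvOgB (dt : List (List Int)) (threshold max_outgoing l i : Int) : List Int :=
  let row := PySem.List.pyGetD dt i []
  let og := (PySem.List.pyRange 0 l 1).filter (fun x => decide (PySem.List.pyGetD row x 0 < threshold))
  if PySem.List.len og > max_outgoing then
    PySem.List.slice (PySem.List.sorted og (fun x => PySem.List.pyGetD row x 0) false) none (some max_outgoing)
  else og

def get_edges_between_two_time_slices_alt (distance_table : List (List Int)) (threshold : Int) (max_outgoing : Int) (max_incoming : Int) : List (List Int) :=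
  let l := PySem.List.len distance_table
  -- one pass: out lists and the reverse target→sources index
  let s := (PySem.List.pyRange 0 l 1).foldl
    (fun s i =>
      (s.1 ++ [pvOgB distance_table threshold max_outgoing l i],
       (pvOgB distance_table threshold max_outgoing l i).foldl
         (fun inc x => PySem.List.pySetD inc x (PySem.List.pyGetD inc x [] ++ [i])) s.2))
    (([] : List (List Int)), (PySem.List.pyRange 0 l 1).map (fun _ => ([] : List Int)))
  -- the set of (source, target) edges over the incoming cap
  let removed := (PySem.List.pyRange 0 l 1).foldl
    (fun rem j =>
      let srcs := PySem.List.pyGetD s.2 j []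
      if PySem.List.len srcs > max_incoming then
        (PySem.List.slice (PySem.List.sorted srcs (fun x => pvDget distance_table x j) false) (some max_incoming) none).foldl
          (fun rem i => PySem.Set.add rem (i, j)) rem
      else rem)
    (PySem.Set.empty : PySem.Set (Int × Int))
  (PySem.List.enumerate s.1 0).map (fun p => p.2.filter (fun j => decide ((p.1, j) ∉ removed)))

-- ===== PRECONDITION & SPEC =====
-- Pre_ excludes exactly the tables with a row shorter than the table itself, on which
-- Python A raises IndexError (distance_table[i][x] for x in range(len(distance_table))).
def Pre_get_edges_between_two_time_slices (distance_table : List (List Int)) (threshold : Int) (max_outgoing : Int) (max_incoming : Int) : Prop :=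
  ∀ row ∈ distance_table, distance_table.length ≤ row.length
instance (distance_table : List (List Int)) (threshold : Int) (max_outgoing : Int) (max_incoming : Int) : Decidable (Pre_get_edges_between_two_time_slices distance_table threshold max_outgoing max_incoming) := by unfold Pre_get_edges_between_two_time_slices; infer_instance

def pvWitness_get_edges_between_two_time_slices : List (List Int) × Int × Int × Int :=
  ([[0, 3, 1], [2, 0, 4], [1, 5, 0]], 4, 2, 1)

def Spec_get_edges_between_two_time_slices (distance_table : List (List Int)) (threshold : Int) (max_outgoing : Int) (max_incoming : Int) (out : List (List Int)) : Prop := out = get_edges_between_two_time_slices_alt distance_table threshold max_outgoing max_incoming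
instance (distance_table : List (List Int)) (threshold : Int) (max_outgoing : Int) (max_incoming : Int) (out : List (List Int)) : Decidable (Spec_get_edges_between_two_time_slices distance_table threshold max_outgoing max_incoming out) := by unfold Spec_get_edges_between_two_time_slices; infer_instance

-- ===== CLAIM (what is proved, stated in full; the proofs are below) =====
def Claim_equal_get_edges_between_two_time_slices : Prop := ∀ (distance_table : List (List Int)) (threshold : Int) (max_outgoing : Int) (max_incoming : Int), Dom_get_edges_between_two_time_slices distance_table threshold max_outgoing max_incoming → Pre_get_edges_between_two_time_slices distance_table threshold max_outgoing max_incoming → Spec_get_edges_between_two_time_slices distance_table threshold max_outgoing max_incoming (get_edges_between_two_time_slices distance_table threshold max_outgoing max_incoming)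

-- ===== LEMMAS AND PROOFS =====

theorem pvWitness_ok :
    Dom_get_edges_between_two_time_slices (pvWitness_get_edges_between_two_time_slices.1) (pvWitness_get_edges_between_two_time_slices.2.1) (pvWitness_get_edges_between_two_time_slices.2.2.1) (pvWitness_get_edges_between_two_time_slices.2.2.2) ∧
    Pre_get_edges_between_two_time_slices (pvWitness_get_edges_between_two_time_slices.1) (pvWitness_get_edges_between_two_time_slices.2.1) (pvWitness_get_edges_between_two_time_slices.2.2.1) (pvWitness_get_edges_between_two_time_slices.2.2.2) := by
  constructor <;> decide

-- slices are sublists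
theorem pv_slice_sublist {α : Type} (xs : List α) (a b : Option Int) :
    (PySem.List.slice xs a b).Sublist xs := by
  unfold PySem.List.slice
  exact (List.take_sublist _ _).trans (List.drop_sublist _ _)

-- the incoming candidates of target j, computed from the initial outgoing lists
def pvInc0 (dt : List (List Int)) (th mo j : Int) : List Int :=
  (PySem.List.pyRange 0 (PySem.List.len dt) 1).filter
    (fun i => decide (j ∈ pvOutgoingsA dt th mo (PySem.List.len dt) i))

-- the sources whose edge to target j is dropped by the incoming cap
def pvRem (dt : List (List Int)) (th mo mi j : Int) : List Int :=
  if PySem.List.len (pvInc0 dt th mo j) > mi then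
    PySem.List.slice (PySem.List.sorted (pvInc0 dt th mo j) (fun x => pvDget dt x j) false) (some mi) none
  else []

-- the state of A's list after the second loop has processed targets 0, …, m-1
def pvStage (dt : List (List Int)) (th mo mi m : Int) : List (List Int) :=
  (PySem.List.pyRange 0 (PySem.List.len dt) 1).map
    (fun i => (pvOutgoingsA dt th mo (PySem.List.len dt) i).filter
      (fun v => decide (¬ (v < m ∧ i ∈ pvRem dt th mo mi v))))

theorem pvOg_eq (dt : List (List Int)) (th mo l i : Int) :
    pvOgB dt th mo l i = pvOutgoingsA dt th mo l i := rfl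

theorem pvOut_mem (dt : List (List Int)) (th mo l i : Int) :
    ∀ v ∈ pvOutgoingsA dt th mo l i, 0 ≤ v ∧ v < l := by
  intro v hv
  unfold pvOutgoingsA at hv
  simp only at hv
  split at hv
  · have := PySem.List.mem_of_mem_slice _ _ _ hv
    rw [PySem.List.mem_sorted] at this
    have := List.mem_filter.mp this
    exact PySem.List.mem_pyRange_one.mp this.1
  · exact PySem.List.mem_pyRange_one.mp (List.mem_filter.mp hv).1

theorem pvOut_nodup (dt : List (List Int)) (th mo l i : Int) :
    (pvOutgoingsA dt th mo l i).Nodup := by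
  unfold pvOutgoingsA
  simp only
  have hnd : ((PySem.List.pyRange 0 l 1).filter (fun x => decide (pvDget dt i x < th))).Nodup :=
    (PySem.List.nodup_pyRange_one 0 l).filter _
  split
  · exact (pv_slice_sublist _ _ _).nodup ((PySem.List.sorted_perm _ _ _).nodup_iff.mpr hnd)
  · exact hnd

theorem pvInc0_nodup (dt : List (List Int)) (th mo j : Int) :
    (pvInc0 dt th mo j).Nodup := by
  exact (PySem.List.nodup_pyRange_one 0 _).filter _

theorem pvInc0_mem_iff (dt : List (List Int)) (th mo j i : Int) :
    i ∈ pvInc0 dt th mo j ↔ (0 ≤ i ∧ i < PySem.List.len dt ∧ j ∈ pvOutgoingsA dt th mo (PySem.List.len dt) i) := by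
  unfold pvInc0
  simp only [List.mem_filter, PySem.List.mem_pyRange_one, decide_eq_true_eq]
  tauto

theorem pvRem_nodup (dt : List (List Int)) (th mo mi j : Int) :
    (pvRem dt th mo mi j).Nodup := by
  unfold pvRem
  split
  · exact (pv_slice_sublist _ _ _).nodup
      ((PySem.List.sorted_perm _ _ _).nodup_iff.mpr (pvInc0_nodup dt th mo j))
  · exact List.nodup_nil

theorem pvRem_sub (dt : List (List Int)) (th mo mi j i : Int) (h : i ∈ pvRem dt th mo mi j) :
    i ∈ pvInc0 dt th mo j := by
  unfold pvRem at h
  split at h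
  · have := PySem.List.mem_of_mem_slice _ _ _ h
    exact (PySem.List.mem_sorted _ _ _ _).mp this
  · exact absurd h (List.not_mem_nil)

-- writing one cell of a tabulated list retabulates it
theorem pvSetD_map_pyRange {α : Type} (G : Int → α) (l i : Int) (v : α) (h0 : 0 ≤ i) (h1 : i < l) :
    PySem.List.pySetD ((PySem.List.pyRange 0 l 1).map G) i v
    = (PySem.List.pyRange 0 l 1).map (fun x => if x = i then v else G x) := by
  apply List.ext_getElem
  · simp [PySem.List.length_pySetD]
  · intro k hk hk'
    simp only [PySem.List.pySetD_of_nonneg _ v h0]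
    simp only [List.getElem_set, List.getElem_map, PySem.List.getElem_pyRange_one]
    have hkl : (k : Int) < l := by
      have := hk'
      simp only [List.length_map, PySem.List.length_pyRange_one] at this
      omega
    by_cases hcase : (0 : Int) + (k : Int) = i
    · rw [if_pos (by omega : i.toNat = k), if_pos hcase]
    · rw [if_neg (by omega : ¬ i.toNat = k), if_neg hcase]

-- generic: a fold of in-place updates at pairwise-distinct in-range positions of a tabulated list
theorem pvSetFold (u : Int → List Int → List Int) (l : Int) (R : List Int) (hR : R.Nodup)
    (G G' : Int → List Int)
    (h1 : ∀ i ∈ R, 0 ≤ i ∧ i < l ∧ u i (G i) = G' i)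
    (h2 : ∀ i, 0 ≤ i → i < l → i ∉ R → G' i = G i) :
    R.foldl (fun lst i => PySem.List.pySetD lst i (u i (PySem.List.pyGetD lst i [])))
      ((PySem.List.pyRange 0 l 1).map G)
    = (PySem.List.pyRange 0 l 1).map G' := by
  induction R generalizing G with
  | nil =>
    simp only [List.foldl_nil]
    apply List.map_congr_left
    intro i hi
    have := PySem.List.mem_pyRange_one.mp hi
    exact (h2 i this.1 this.2 (List.not_mem_nil)).symm
  | cons i0 R ih =>
    have h10 := h1 i0 List.mem_cons_self
    simp only [List.foldl_cons]
    rw [PySem.List.pyGetD_map_pyRange_of_nonneg G l i0 [] h10.1 h10.2.1,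
        pvSetD_map_pyRange G l i0 _ h10.1 h10.2.1]
    rw [ih (List.Nodup.of_cons hR) (fun x => if x = i0 then u i0 (G i0) else G x) ?h1 ?h2]
    case h1 =>
      intro i hi
      have hne : i ≠ i0 := fun he => (List.nodup_cons.mp hR).1 (he ▸ hi)
      simp only [if_neg hne]
      exact h1 i (List.mem_cons_of_mem _ hi)
    case h2 =>
      intro i hpos hlt hni
      by_cases he : i = i0
      · subst he
        simpa using h10.2.2.symm
      · simp only [if_neg he]
        exact h2 i hpos hlt (by simp [he, hni])


-- A's first loop builds the table of outgoing lists
theorem pvPhase1A (dt : List (List Int)) (th mo : Int) :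
    (PySem.List.pyRange 0 (PySem.List.len dt) 1).foldl
      (fun lst i => lst ++ [pvOutgoingsA dt th mo (PySem.List.len dt) i]) []
    = (PySem.List.pyRange 0 (PySem.List.len dt) 1).map (pvOutgoingsA dt th mo (PySem.List.len dt)) := by
  rw [PySem.List.foldl_append_singleton_eq_map]
  simp

-- on the stage-m list, the incoming scan for target m sees the initial memberships
theorem pvIncomingA_stage (dt : List (List Int)) (th mo mi m : Int) :
    pvIncomingA (pvStage dt th mo mi m) m = pvInc0 dt th mo m := by
  unfold pvIncomingA pvInc0
  have hlen : PySem.List.len (pvStage dt th mo mi m) = PySem.List.len dt := by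
    simp only [pvStage, PySem.List.len_eq, List.length_map, PySem.List.length_pyRange_one]
    omega
  rw [PySem.List.enumerate_eq_map_pyRange _ ([] : List Int), hlen]
  rw [List.filter_map, List.map_map]
  have : ((fun p : Int × List Int => p.1) ∘ fun j => (j, PySem.List.pyGetD (pvStage dt th mo mi m) j []))
      = fun j => j := rfl
  rw [this, List.map_id']
  apply List.filter_congr
  intro j hj
  have hj' := PySem.List.mem_pyRange_one.mp hj
  have hg : PySem.List.pyGetD (pvStage dt th mo mi m) j []
      = (pvOutgoingsA dt th mo (PySem.List.len dt) j).filter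
          (fun v => decide (¬ (v < m ∧ j ∈ pvRem dt th mo mi v))) := by
    unfold pvStage
    exact PySem.List.pyGetD_map_pyRange_of_nonneg _ _ _ _ hj'.1 hj'.2
  simp only [Function.comp, hg, decide_eq_decide, List.mem_filter, decide_eq_true_eq]
  constructor
  · exact fun h => h.1
  · intro h
    exact ⟨h, by omega⟩

theorem pvStage_zero (dt : List (List Int)) (th mo mi : Int) :
    pvStage dt th mo mi 0
    = (PySem.List.pyRange 0 (PySem.List.len dt) 1).map (pvOutgoingsA dt th mo (PySem.List.len dt)) := by
  unfold pvStage
  apply List.map_congr_left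
  intro i _
  apply List.filter_eq_self.mpr
  intro v hv
  have := (pvOut_mem dt th mo _ i v hv).1
  simp only [decide_eq_true_eq]
  omega

-- one step of A's second loop advances the stage
theorem pvStep_stage (dt : List (List Int)) (th mo mi m : Int) (hm : 0 ≤ m) :
    pvRemoveStepA dt mi (pvStage dt th mo mi m) m = pvStage dt th mo mi (m + 1) := by
  simp only [pvRemoveStepA]
  rw [pvIncomingA_stage dt th mo mi m]
  by_cases hc : PySem.List.len (pvInc0 dt th mo m) > mi
  · rw [if_pos hc]
    have hrem : PySem.List.slice (PySem.List.sorted (pvInc0 dt th mo m) (fun x => pvDget dt x m) false) (some mi) none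
        = pvRem dt th mo mi m := by
      unfold pvRem; rw [if_pos hc]
    rw [hrem]
    unfold pvStage
    apply pvSetFold (fun _ cur => (PySem.List.remove? cur m).getD cur) (PySem.List.len dt)
      (pvRem dt th mo mi m) (pvRem_nodup dt th mo mi m)
    · -- h1 : removed rows get m filtered out
      intro i hi
      have hii := (pvInc0_mem_iff dt th mo m i).mp (pvRem_sub dt th mo mi m i hi)
      refine ⟨hii.1, hii.2.1, ?_⟩
      set F := pvOutgoingsA dt th mo (PySem.List.len dt) i with hF
      have hmF : m ∈ F.filter (fun v => decide (¬ (v < m ∧ i ∈ pvRem dt th mo mi v))) := by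
        rw [List.mem_filter]
        exact ⟨hii.2.2, by simp⟩
      have hnd : (F.filter (fun v => decide (¬ (v < m ∧ i ∈ pvRem dt th mo mi v)))).Nodup :=
        (pvOut_nodup dt th mo _ i).filter _
      rw [PySem.List.remove?_eq_some_erase _ m hmF, Option.getD_some, hnd.erase_eq_filter,
        List.filter_filter]
      apply List.filter_congr
      intro v _
      rw [Bool.eq_iff_iff]
      simp only [Bool.and_eq_true, bne_iff_ne, decide_eq_true_eq]
      constructor
      · rintro ⟨hne, hnot⟩ ⟨hlt, hmemv⟩
        exact hnot ⟨by omega, hmemv⟩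
      · intro h
        refine ⟨fun he => h ⟨by omega, he ▸ hi⟩, fun hcon => h ⟨by omega, hcon.2⟩⟩
    · -- h2 : untouched rows are unchanged
      intro i _ _ hni
      apply List.filter_congr
      intro v _
      rw [Bool.eq_iff_iff]
      simp only [decide_eq_true_eq]
      constructor
      · rintro h ⟨hlt, hmemv⟩
        exact h ⟨by omega, hmemv⟩
      · rintro h ⟨hlt, hmemv⟩
        by_cases he : v = m
        · subst he; exact absurd hmemv hni
        · exact h ⟨by omega, hmemv⟩
  · rw [if_neg hc]
    have hrem : pvRem dt th mo mi m = [] := by unfold pvRem; rw [if_neg hc]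
    unfold pvStage
    apply List.map_congr_left
    intro i _
    apply List.filter_congr
    intro v _
    rw [Bool.eq_iff_iff]
    simp only [decide_eq_true_eq]
    constructor
    · rintro h ⟨hlt, hmemv⟩
      by_cases he : v = m
      · subst he; rw [hrem] at hmemv; exact absurd hmemv (List.not_mem_nil)
      · exact h ⟨by omega, hmemv⟩
    · rintro h ⟨hlt, hmemv⟩
      exact h ⟨by omega, hmemv⟩

-- A's second loop, run on targets 0..n-1
theorem pvPhase2A (dt : List (List Int)) (th mo mi : Int) (n : Nat) :
    (PySem.List.pyRange 0 (n : Int) 1).foldl (pvRemoveStepA dt mi) (pvStage dt th mo mi 0)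
    = pvStage dt th mo mi (n : Int) := by
  induction n with
  | zero =>
    rw [PySem.List.pyRange_one_eq_nil (by omega)]
    simp
  | succ n ih =>
    have hcast : ((n + 1 : Nat) : Int) = (n : Int) + 1 := by push_cast; ring
    rw [hcast, PySem.List.pyRange_one_succ_right (by omega : (0:Int) ≤ (n:Int)),
      List.foldl_append, ih]
    simp only [List.foldl_cons, List.foldl_nil]
    exact pvStep_stage dt th mo mi (n : Int) (by omega)

theorem pvA_eq_stage (dt : List (List Int)) (th mo mi : Int) :
    get_edges_between_two_time_slices dt th mo mi = pvStage dt th mo mi (PySem.List.len dt) := by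
  show (PySem.List.pyRange 0 (PySem.List.len dt) 1).foldl (pvRemoveStepA dt mi)
      ((PySem.List.pyRange 0 (PySem.List.len dt) 1).foldl
        (fun lst i => lst ++ [pvOutgoingsA dt th mo (PySem.List.len dt) i]) [])
    = pvStage dt th mo mi (PySem.List.len dt)
  rw [pvPhase1A, ← pvStage_zero dt th mo mi]
  have : PySem.List.len dt = ((dt.length : Nat) : Int) := by simp [PySem.List.len_eq]
  rw [this]
  exact pvPhase2A dt th mo mi dt.length

-- B's index-building fold, characterised
theorem pvIncomingChar (dt : List (List Int)) (th mo : Int) (I : List Int) :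
    ∀ G : Int → List Int,
    I.foldl
      (fun inc i => (pvOgB dt th mo (PySem.List.len dt) i).foldl
        (fun inc x => PySem.List.pySetD inc x (PySem.List.pyGetD inc x [] ++ [i])) inc)
      ((PySem.List.pyRange 0 (PySem.List.len dt) 1).map G)
    = (PySem.List.pyRange 0 (PySem.List.len dt) 1).map
        (fun j => G j ++ I.filter (fun i => decide (j ∈ pvOgB dt th mo (PySem.List.len dt) i))) := by
  induction I with
  | nil =>
    intro G
    simp
  | cons i I ih =>
    intro G
    simp only [List.foldl_cons]
    have hin : (pvOgB dt th mo (PySem.List.len dt) i).foldl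
        (fun inc x => PySem.List.pySetD inc x (PySem.List.pyGetD inc x [] ++ [i]))
        ((PySem.List.pyRange 0 (PySem.List.len dt) 1).map G)
      = (PySem.List.pyRange 0 (PySem.List.len dt) 1).map
          (fun j => if j ∈ pvOgB dt th mo (PySem.List.len dt) i then G j ++ [i] else G j) := by
      apply pvSetFold (fun _ cur => cur ++ [i]) (PySem.List.len dt)
        (pvOgB dt th mo (PySem.List.len dt) i)
        (by rw [pvOg_eq]; exact pvOut_nodup dt th mo _ i)
      · intro x hx
        rw [pvOg_eq] at hx
        have := pvOut_mem dt th mo (PySem.List.len dt) i x hx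
        exact ⟨this.1, this.2, by rw [if_pos (by rw [pvOg_eq]; exact hx)]⟩
      · intro x _ _ hnx
        rw [if_neg hnx]
    rw [hin, ih]
    apply List.map_congr_left
    intro j _
    by_cases hj : j ∈ pvOgB dt th mo (PySem.List.len dt) i
    · rw [if_pos hj, List.filter_cons, if_pos (by simpa using hj)]
      simp
    · rw [if_neg hj, List.filter_cons, if_neg (by simpa using hj)]

-- B's add-fold over one target
theorem pvAddFold (R : List Int) (j : Int) (s : PySem.Set (Int × Int)) (p : Int × Int) :
    (p ∈ R.foldl (fun rem i => PySem.Set.add rem (i, j)) s) ↔ (p ∈ s ∨ (p.2 = j ∧ p.1 ∈ R)) := by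
  induction R generalizing s with
  | nil => simp
  | cons i R ih =>
    simp only [List.foldl_cons, ih, PySem.Set.mem_add, List.mem_cons, Prod.ext_iff]
    tauto

-- membership in B's removed-edges set
theorem pvRemovedMem (dt : List (List Int)) (th mo mi : Int) (J : List Int)
    (hJ : ∀ j ∈ J, 0 ≤ j ∧ j < PySem.List.len dt) :
    ∀ (s : PySem.Set (Int × Int)) (p : Int × Int),
    (p ∈ J.foldl (fun rem j =>
      if PySem.List.len (PySem.List.pyGetD ((PySem.List.pyRange 0 (PySem.List.len dt) 1).map (pvInc0 dt th mo)) j []) > mi then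
        (PySem.List.slice (PySem.List.sorted (PySem.List.pyGetD ((PySem.List.pyRange 0 (PySem.List.len dt) 1).map (pvInc0 dt th mo)) j []) (fun x => pvDget dt x j) false) (some mi) none).foldl
          (fun rem i => PySem.Set.add rem (i, j)) rem
      else rem) s)
    ↔ (p ∈ s ∨ (p.2 ∈ J ∧ p.1 ∈ pvRem dt th mo mi p.2)) := by
  induction J with
  | nil =>
    intro s p
    simp
  | cons j J ih =>
    intro s p
    have hj := hJ j List.mem_cons_self
    have hsrc : PySem.List.pyGetD ((PySem.List.pyRange 0 (PySem.List.len dt) 1).map (pvInc0 dt th mo)) j []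
        = pvInc0 dt th mo j :=
      PySem.List.pyGetD_map_pyRange_of_nonneg _ _ _ _ hj.1 hj.2
    simp only [List.foldl_cons, hsrc]
    have hstep : ∀ q : Int × Int,
        (q ∈ (if PySem.List.len (pvInc0 dt th mo j) > mi then
          (PySem.List.slice (PySem.List.sorted (pvInc0 dt th mo j) (fun x => pvDget dt x j) false) (some mi) none).foldl
            (fun rem i => PySem.Set.add rem (i, j)) s
        else s))
        ↔ (q ∈ s ∨ (q.2 = j ∧ q.1 ∈ pvRem dt th mo mi j)) := by
      intro q
      by_cases hc : PySem.List.len (pvInc0 dt th mo j) > mi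
      · rw [if_pos hc, pvAddFold]
        unfold pvRem
        rw [if_pos hc]
      · rw [if_neg hc]
        unfold pvRem
        rw [if_neg hc]
        simp
    rw [ih (fun x hx => hJ x (List.mem_cons_of_mem _ hx)), hstep]
    simp only [List.mem_cons]
    constructor
    · rintro ((hs | ⟨he, hr⟩) | ⟨hm2, hr⟩)
      · exact Or.inl hs
      · exact Or.inr ⟨Or.inl he, he ▸ hr⟩
      · exact Or.inr ⟨Or.inr hm2, hr⟩
    · rintro (hs | ⟨(he | hm2), hr⟩)
      · exact Or.inl (Or.inl hs)
      · exact Or.inl (Or.inr ⟨he, he ▸ hr⟩)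
      · exact Or.inr ⟨hm2, hr⟩

theorem pvB_eq_stage (dt : List (List Int)) (th mo mi : Int) :
    get_edges_between_two_time_slices_alt dt th mo mi = pvStage dt th mo mi (PySem.List.len dt) := by
  simp only [get_edges_between_two_time_slices_alt]
  rw [PySem.List.foldl_prod_mk
    (f := fun acc i => acc ++ [pvOgB dt th mo (PySem.List.len dt) i])
    (g := fun acc i => (pvOgB dt th mo (PySem.List.len dt) i).foldl
      (fun inc x => PySem.List.pySetD inc x (PySem.List.pyGetD inc x [] ++ [i])) acc)]
  simp only [pvOg_eq]
  rw [pvPhase1A]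
  have h2 : (PySem.List.pyRange 0 (PySem.List.len dt) 1).foldl
      (fun acc i => (pvOutgoingsA dt th mo (PySem.List.len dt) i).foldl
        (fun inc x => PySem.List.pySetD inc x (PySem.List.pyGetD inc x [] ++ [i])) acc)
      ((PySem.List.pyRange 0 (PySem.List.len dt) 1).map (fun _ => ([] : List Int)))
      = (PySem.List.pyRange 0 (PySem.List.len dt) 1).map (pvInc0 dt th mo) := by
    have := pvIncomingChar dt th mo (PySem.List.pyRange 0 (PySem.List.len dt) 1) (fun _ => ([] : List Int))
    simp only [pvOg_eq] at this
    rw [this]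
    apply List.map_congr_left
    intro j _
    rfl
  rw [h2]
  have hlen : PySem.List.len ((PySem.List.pyRange 0 (PySem.List.len dt) 1).map (pvOutgoingsA dt th mo (PySem.List.len dt)))
      = PySem.List.len dt := by
    simp only [PySem.List.len_eq, List.length_map, PySem.List.length_pyRange_one]
    omega
  rw [PySem.List.enumerate_eq_map_pyRange _ ([] : List Int), hlen, List.map_map]
  unfold pvStage
  apply List.map_congr_left
  intro j hj
  have hj' := PySem.List.mem_pyRange_one.mp hj
  simp only [Function.comp]
  rw [PySem.List.pyGetD_map_pyRange_of_nonneg _ _ _ _ hj'.1 hj'.2]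
  apply List.filter_congr
  intro v hv
  have hvm := pvOut_mem dt th mo (PySem.List.len dt) j v hv
  rw [decide_eq_decide]
  rw [pvRemovedMem dt th mo mi _ (fun x hx => PySem.List.mem_pyRange_one.mp hx)]
  simp only [PySem.Set.empty, List.not_mem_nil, false_or, PySem.List.mem_pyRange_one]
  constructor
  · intro h hcon
    exact h ⟨⟨hvm.1, hcon.1⟩, hcon.2⟩
  · rintro h ⟨⟨_, hlt⟩, hr⟩
    exact h ⟨hlt, hr⟩

-- ===== VERDICT (by name: the statement is the Claim_ definition above) =====
theorem get_edges_between_two_time_slices_spec : Claim_equal_get_edges_between_two_time_slices := by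
  intro dt th mo mi _ _
  unfold Spec_get_edges_between_two_time_slices
  rw [pvA_eq_stage, pvB_eq_stage]
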